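-- pv_equiv track=rewrite | github.com/Prowo/MIDI-PHOR | comprehensive_llm_prompt.py | _categorize_facts
-- ===== SOURCE A (Python) =====
-- from typing import Dict, List, Any
--
-- def _categorize_facts(facts: List[str]) -> Dict[str, List[str]]:
-- 	"""Dynamically categorize facts by type"""
-- 	categories = {
-- 		'structure': [],
-- 		'instrumentation': [],
-- 		'harmony': [],
-- 		'performance': [],
-- 		'compositional': []
-- 	}
--
-- 	for fact in facts:
-- 		fact_lower = fact.lower()
-- 		if any(word in fact_lower for word in ['section', 'bar', 'form']):
-- 			categories['structure'].append(fact)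
-- 		elif any(word in fact_lower for word in ['instrument', 'track', 'program', 'register']):
-- 			categories['instrumentation'].append(fact)
-- 		elif any(word in fact_lower for word in ['chord', 'pitch', 'harmonic', 'triad']):
-- 			categories['harmony'].append(fact)
-- 		elif any(word in fact_lower for word in ['controller', 'expression', 'volume', 'modulation']):
-- 			categories['performance'].append(fact)
-- 		else:
-- 			categories['compositional'].append(fact)
--
-- 	return categories
-- ===== SOURCE B (Python) =====
-- def _categorize_facts(facts):
-- 	"""Dynamically categorize facts by type (data-driven rule table + per-category filters)"""
-- 	rules = [
-- 		('structure', ['section', 'bar', 'form']),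
-- 		('instrumentation', ['instrument', 'track', 'program', 'register']),
-- 		('harmony', ['chord', 'pitch', 'harmonic', 'triad']),
-- 		('performance', ['controller', 'expression', 'volume', 'modulation']),
-- 	]
--
-- 	def rank(fact):
-- 		fl = fact.lower()
-- 		for i, (_, words) in enumerate(rules):
-- 			if any(w in fl for w in words):
-- 				return i
-- 		return len(rules)
--
-- 	names = [name for name, _ in rules] + ['compositional']
-- 	ranked = [(rank(f), f) for f in facts]
-- 	return {name: [f for r, f in ranked if r == i] for i, name in enumerate(names)}
-- ===== Notes on version B (the rewrite author's own statement) =====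
-- stated objective: alternative
-- what changed: Replaces the single fold with an if/elif chain mutating a dict by a data-driven rule table: a rank function picks the first matching rule, and each category is built by its own filter pass over the facts.
import Mathlib
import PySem

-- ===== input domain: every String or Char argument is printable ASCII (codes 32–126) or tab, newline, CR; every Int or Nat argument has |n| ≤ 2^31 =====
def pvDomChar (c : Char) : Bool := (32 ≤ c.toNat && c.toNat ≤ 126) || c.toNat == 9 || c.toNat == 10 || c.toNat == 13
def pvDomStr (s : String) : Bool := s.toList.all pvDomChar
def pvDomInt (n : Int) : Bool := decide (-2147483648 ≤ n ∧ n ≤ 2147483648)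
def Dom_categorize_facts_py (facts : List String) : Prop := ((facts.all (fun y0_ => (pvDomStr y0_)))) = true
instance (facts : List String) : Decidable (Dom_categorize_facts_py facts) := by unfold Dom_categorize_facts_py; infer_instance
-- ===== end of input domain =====

-- B replaces the if/elif chain with a rule-table rank function and per-category filter passes (alternative decomposition, same cost).


-- ===== PORT A =====
-- loop body of A's 'for fact in facts' (kept as a named helper; same code)
def pvStepA (categories : PySem.Dict String (List String)) (fact : String) :
    PySem.Dict String (List String) :=
  let fact_lower := PySem.Str.lower fact
  if ["section", "bar", "form"].any (fun word => PySem.Str.isIn word fact_lower) then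
    categories.modify "structure" [] (· ++ [fact])
  else if ["instrument", "track", "program", "register"].any (fun word => PySem.Str.isIn word fact_lower) then
    categories.modify "instrumentation" [] (· ++ [fact])
  else if ["chord", "pitch", "harmonic", "triad"].any (fun word => PySem.Str.isIn word fact_lower) then
    categories.modify "harmony" [] (· ++ [fact])
  else if ["controller", "expression", "volume", "modulation"].any (fun word => PySem.Str.isIn word fact_lower) then
    categories.modify "performance" [] (· ++ [fact])
  else
    categories.modify "compositional" [] (· ++ [fact])

def categorize_facts_py (facts : List String) : List (String × List String) :=
  let categories : PySem.Dict String (List String) :=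
    (((((PySem.Dict.empty.insert "structure" []).insert "instrumentation" []).insert
        "harmony" []).insert "performance" []).insert "compositional" [])
  (facts.foldl pvStepA categories).items

-- ===== PORT B =====
def pvRules : List (String × List String) :=
  [("structure", ["section", "bar", "form"]),
   ("instrumentation", ["instrument", "track", "program", "register"]),
   ("harmony", ["chord", "pitch", "harmonic", "triad"]),
   ("performance", ["controller", "expression", "volume", "modulation"])]

-- the 'for i, (_, words) in enumerate(rules): if any(...): return i' loop of Source B's rank
def pvRankGo (fl : String) : List (Int × (String × List String)) → Int
  | [] => pvRules.length
  | (i, (_, words)) :: rest =>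
      if words.any (fun w => PySem.Str.isIn w fl) then i else pvRankGo fl rest

def pvRank (fact : String) : Int :=
  pvRankGo (PySem.Str.lower fact) (PySem.List.enumerate pvRules)

def categorize_facts_py_alt (facts : List String) : List (String × List String) :=
  let names := pvRules.map (·.1) ++ ["compositional"]
  let ranked := facts.map (fun f => (pvRank f, f))
  (PySem.List.enumerate names).map
    (fun p => (p.2, (ranked.filter (fun q => q.1 == p.1)).map (·.2)))

-- ===== PRECONDITION & SPEC =====
def Spec_categorize_facts_py (facts : List String) (out : List (String × List String)) : Prop := out = categorize_facts_py_alt facts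
instance (facts : List String) (out : List (String × List String)) : Decidable (Spec_categorize_facts_py facts out) := by unfold Spec_categorize_facts_py; infer_instance

-- ===== CLAIM (what is proved, stated in full; the proofs are below) =====
def Claim_equal_categorize_facts_py : Prop := ∀ (facts : List String), Dom_categorize_facts_py facts → Spec_categorize_facts_py facts (categorize_facts_py facts)

-- ===== LEMMAS AND PROOFS =====

-- proof-only helper: "some word of the rule matches fact.lower()"
def pvHit (words : List String) (fact : String) : Bool :=
  words.any (fun w => PySem.Str.isIn w (PySem.Str.lower fact))

lemma pvRank_eq (fact : String) : pvRank fact =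
    (if pvHit ["section", "bar", "form"] fact then 0
     else if pvHit ["instrument", "track", "program", "register"] fact then 1
     else if pvHit ["chord", "pitch", "harmonic", "triad"] fact then 2
     else if pvHit ["controller", "expression", "volume", "modulation"] fact then 3
     else 4) := by
  simp [pvRank, pvRankGo, pvRules, pvHit, PySem.List.enumerate_cons, PySem.List.enumerate_nil]

lemma pv_step_eq (l0 l1 l2 l3 l4 : List String) (fact : String) :
    pvStepA
      (PySem.Dict.mk [("structure", l0), ("instrumentation", l1), ("harmony", l2),
        ("performance", l3), ("compositional", l4)]) fact =
    (if pvHit ["section", "bar", "form"] fact then PySem.Dict.mk [("structure", l0 ++ [fact]), ("instrumentation", l1), ("harmony", l2), ("performance", l3), ("compositional", l4)]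
     else if pvHit ["instrument", "track", "program", "register"] fact then PySem.Dict.mk [("structure", l0), ("instrumentation", l1 ++ [fact]), ("harmony", l2), ("performance", l3), ("compositional", l4)]
     else if pvHit ["chord", "pitch", "harmonic", "triad"] fact then PySem.Dict.mk [("structure", l0), ("instrumentation", l1), ("harmony", l2 ++ [fact]), ("performance", l3), ("compositional", l4)]
     else if pvHit ["controller", "expression", "volume", "modulation"] fact then PySem.Dict.mk [("structure", l0), ("instrumentation", l1), ("harmony", l2), ("performance", l3 ++ [fact]), ("compositional", l4)]
     else PySem.Dict.mk [("structure", l0), ("instrumentation", l1), ("harmony", l2), ("performance", l3), ("compositional", l4 ++ [fact])]) := by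
  simp only [pvHit]
  simp only [pvStepA]
  split_ifs <;>
    simp_all [PySem.Dict.modify, PySem.Dict.contains, PySem.Dict.get?, PySem.Dict.getD,
      PySem.Dict.insert]

lemma pv_fold_inv (facts : List String) (l0 l1 l2 l3 l4 : List String) :
    facts.foldl pvStepA
      (PySem.Dict.mk [("structure", l0), ("instrumentation", l1), ("harmony", l2),
        ("performance", l3), ("compositional", l4)]) =
    PySem.Dict.mk
      [("structure", l0 ++ facts.filter (fun f => pvRank f == 0)),
       ("instrumentation", l1 ++ facts.filter (fun f => pvRank f == 1)),
       ("harmony", l2 ++ facts.filter (fun f => pvRank f == 2)),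
       ("performance", l3 ++ facts.filter (fun f => pvRank f == 3)),
       ("compositional", l4 ++ facts.filter (fun f => pvRank f == 4))] := by
  induction facts generalizing l0 l1 l2 l3 l4 with
  | nil => simp
  | cons fact rest ih =>
    rw [List.foldl_cons, pv_step_eq]
    by_cases h0 : pvHit ["section", "bar", "form"] fact = true
    · have hr : pvRank fact = 0 := by simp [pvRank_eq, h0]
      rw [if_pos h0, ih]
      simp [hr]
    · by_cases h1 : pvHit ["instrument", "track", "program", "register"] fact = true
      · have hr : pvRank fact = 1 := by simp [pvRank_eq, h0, h1]
        rw [if_neg h0, if_pos h1, ih]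
        simp [hr]
      · by_cases h2 : pvHit ["chord", "pitch", "harmonic", "triad"] fact = true
        · have hr : pvRank fact = 2 := by simp [pvRank_eq, h0, h1, h2]
          rw [if_neg h0, if_neg h1, if_pos h2, ih]
          simp [hr]
        · by_cases h3 : pvHit ["controller", "expression", "volume", "modulation"] fact = true
          · have hr : pvRank fact = 3 := by simp [pvRank_eq, h0, h1, h2, h3]
            rw [if_neg h0, if_neg h1, if_neg h2, if_pos h3, ih]
            simp [hr]
          · have hr : pvRank fact = 4 := by simp [pvRank_eq, h0, h1, h2, h3]
            rw [if_neg h0, if_neg h1, if_neg h2, if_neg h3, ih]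
            simp [hr]

-- ===== VERDICT (by name: the statement is the Claim_ definition above) =====
theorem categorize_facts_py_spec : Claim_equal_categorize_facts_py := by
  intro facts _
  show categorize_facts_py facts = categorize_facts_py_alt facts
  show (facts.foldl pvStepA
      (PySem.Dict.mk [("structure", []), ("instrumentation", []), ("harmony", []),
        ("performance", []), ("compositional", [])])).items = categorize_facts_py_alt facts
  rw [pv_fold_inv]
  simp [categorize_facts_py_alt, pvRules, PySem.List.enumerate_cons, PySem.List.enumerate_nil,
    List.filter_map, List.map_map, Function.comp_def]
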